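-- pv_equiv track=rewrite | github.com/Karthick-19/Java-Problems | Python/Valid_Paranthesis.py | more_optimized
-- ===== SOURCE A (Python) =====
-- def more_optimized(s) -> bool:
--     allowed = {'{':'}','(':')','[':']'}
--     arr = []
--     for p in s:
--         if p in allowed:
--             arr.append(p)
--         elif p in allowed.values():
--             if not arr or allowed[arr.pop()] != p:
--                 return False
--     return not arr #if the stack is empty then string has valid parenthesis
-- ===== SOURCE B (Python) =====
-- def more_optimized(s) -> bool:
--     t = ''.join(c for c in s if c in '(){}[]')
--     while True:
--         r = t.replace('()', '').replace('[]', '').replace('{}', '')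
--         if r == t:
--             return t == ''
--         t = r
-- ===== Notes on version B (the rewrite author's own statement) =====
-- stated objective: alternative
-- what changed: Replaces A's one-pass explicit stack (push openers, pop-and-match on closers, early return) by a rewriting algorithm: keep only the bracket characters, then repeatedly delete adjacent matching bracket pairs via str.replace until a fixed point, and return whether the result is empty.
import Mathlib
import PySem

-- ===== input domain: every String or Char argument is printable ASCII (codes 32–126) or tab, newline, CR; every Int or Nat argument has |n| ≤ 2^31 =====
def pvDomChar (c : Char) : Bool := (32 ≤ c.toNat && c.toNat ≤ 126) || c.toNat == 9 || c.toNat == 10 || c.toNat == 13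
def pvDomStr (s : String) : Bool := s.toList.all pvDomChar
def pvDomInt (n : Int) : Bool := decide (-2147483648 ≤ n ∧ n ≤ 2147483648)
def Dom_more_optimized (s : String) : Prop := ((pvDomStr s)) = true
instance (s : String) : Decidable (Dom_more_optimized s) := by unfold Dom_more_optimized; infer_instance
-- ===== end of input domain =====

-- B replaces A's explicit stack by repeated rewriting: filter the brackets, then delete adjacent
-- matching pairs via str.replace until a fixed point, and test for emptiness (alternative algorithm;
-- a timing run measured B faster, C-level str.replace vs a Python-level loop).

-- ===== PORT A =====
def pvAllowed : PySem.Dict Char Char := PySem.Dict.ofList [('{','}'),('(',')'),('[',']')]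

-- one iteration of A's for-loop; state none = the function has already returned False
def pvStepA (st : Option (List Char)) (p : Char) : Option (List Char) :=
  match st with
  | none => none
  | some arr =>
    if pvAllowed.contains p then some (arr ++ [p])
    else if (PySem.Dict.values pvAllowed).contains p then
      match arr.getLast? with
      | none => none                         -- `not arr` → return False
      | some x =>                            -- x = arr.pop()
        if pvAllowed.get? x == some p then some arr.dropLast else none
    else some arr

def more_optimized (s : String) : Bool :=
  match s.toList.foldl pvStepA (some []) with
  | none => false
  | some arr => arr.isEmpty

-- ===== PORT B =====
def pvIsBracket (c : Char) : Bool := "(){}[]".toList.contains c   -- c in '(){}[]'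

-- t.replace(o+c, '') for a two-character pattern of distinct characters: Python's left-to-right
-- non-overlapping scan, ported by hand step for step (exact for such patterns).
def pvRepl (o c : Char) : List Char → List Char
  | x :: y :: rest => if x = o ∧ y = c then pvRepl o c rest else x :: pvRepl o c (y :: rest)
  | l => l
termination_by l => l.length

def pvReduceOnce (t : List Char) : List Char :=
  pvRepl '{' '}' (pvRepl '[' ']' (pvRepl '(' ')' t))

-- Source B's `while True` loop; every non-final iteration strictly shrinks t, so fuel = t.length + 1
-- is never exhausted and the port is exact.
def pvLoopB (fuel : Nat) (t : List Char) : Bool :=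
  match fuel with
  | 0 => t.isEmpty
  | fuel + 1 =>
    let r := pvReduceOnce t
    if r = t then t.isEmpty else pvLoopB fuel r

def more_optimized_alt (s : String) : Bool :=
  let t := s.toList.filter pvIsBracket
  pvLoopB (t.length + 1) t

-- ===== PRECONDITION & SPEC =====
def Spec_more_optimized (s : String) (out : Bool) : Prop := out = more_optimized_alt s
instance (s : String) (out : Bool) : Decidable (Spec_more_optimized s out) := by unfold Spec_more_optimized; infer_instance

-- ===== CLAIM (what is proved, stated in full; the proofs are below) =====
def Claim_equal_more_optimized : Prop := ∀ (s : String), Dom_more_optimized s → Spec_more_optimized s (more_optimized s)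

-- ===== LEMMAS AND PROOFS =====

-- reference predicates and a reference stack machine (proof-only)
def pvIsOpen (c : Char) : Bool := c == '(' || c == '[' || c == '{'
def pvIsClose (c : Char) : Bool := c == ')' || c == ']' || c == '}'
def pvCloses (o c : Char) : Bool :=
  (o == '(' && c == ')') || (o == '[' && c == ']') || (o == '{' && c == '}')

def pvRun : List Char → List Char → Option (List Char)
  | stk, [] => some stk
  | stk, c :: cs =>
    if pvIsOpen c then pvRun (c :: stk) cs
    else if pvIsClose c then
      match stk with
      | [] => none
      | t :: r => if pvCloses t c then pvRun r cs else none
    else pvRun stk cs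

def pvValid (xs : List Char) : Bool :=
  match pvRun [] xs with
  | none => false
  | some stk => stk.isEmpty

lemma pvClose_not_open {c : Char} (hc : pvIsClose c = true) : pvIsOpen c = false := by
  simp only [pvIsClose, Bool.or_eq_true, beq_iff_eq] at hc
  rcases hc with (h | h) | h <;> subst h <;> decide

lemma pvRun_nil (stk : List Char) : pvRun stk [] = some stk := rfl

lemma pvRun_open {c : Char} (ho : pvIsOpen c = true) (stk cs : List Char) :
    pvRun stk (c :: cs) = pvRun (c :: stk) cs := by
  cases stk <;> (conv_lhs => rw [pvRun]) <;> rw [if_pos ho]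

lemma pvRun_skip {c : Char} (ho : pvIsOpen c = false) (hc : pvIsClose c = false)
    (stk cs : List Char) : pvRun stk (c :: cs) = pvRun stk cs := by
  cases stk <;> (conv_lhs => rw [pvRun]) <;>
    rw [if_neg (by simp [ho]), if_neg (by simp [hc])]

lemma pvRun_close_nil {c : Char} (ho : pvIsOpen c = false) (hc : pvIsClose c = true)
    (cs : List Char) : pvRun [] (c :: cs) = none := by
  conv_lhs => rw [pvRun]
  rw [if_neg (by simp [ho]), if_pos hc]

lemma pvRun_close_cons {c : Char} (ho : pvIsOpen c = false) (hc : pvIsClose c = true)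
    (t : Char) (r cs : List Char) :
    pvRun (t :: r) (c :: cs) = if pvCloses t c then pvRun r cs else none := by
  conv_lhs => rw [pvRun]
  rw [if_neg (by simp [ho]), if_pos hc]

lemma pvAllowed_eq : pvAllowed = PySem.Dict.mk [('{','}'),('(',')'),('[',']')] := by decide

lemma pvAllowed_contains (c : Char) : pvAllowed.contains c = pvIsOpen c := by
  rw [pvAllowed_eq, Bool.eq_iff_iff]
  simp only [PySem.Dict.contains_mk, pvIsOpen, Bool.or_eq_true, beq_iff_eq]
  aesop

lemma pvValues_contains (c : Char) : (PySem.Dict.values pvAllowed).contains c = pvIsClose c := by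
  rw [pvAllowed_eq, Bool.eq_iff_iff]
  simp only [PySem.Dict.values_mk, pvIsClose, Bool.or_eq_true, beq_iff_eq]
  aesop

lemma pvAllowed_get? (x p : Char) : (pvAllowed.get? x == some p) = pvCloses x p := by
  rw [pvAllowed_eq, Bool.eq_iff_iff]
  simp only [pvCloses, PySem.Dict.get?_mk_cons, Bool.or_eq_true, Bool.and_eq_true, beq_iff_eq]
  have hnil : ∀ y : Char, (PySem.Dict.mk ([] : List (Char × Char))).get? y = none := by
    intro y; rfl
  by_cases h1 : x = '{' <;> by_cases h2 : x = '(' <;> by_cases h3 : x = '[' <;>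
    simp [h1, h2, h3, hnil] <;> aesop

lemma pvStepA_some (arr : List Char) (p : Char) :
    pvStepA (some arr) p =
      if pvIsOpen p then some (arr ++ [p])
      else if pvIsClose p then
        (match arr.getLast? with
         | none => none
         | some x => if pvCloses x p then some arr.dropLast else none)
      else some arr := by
  simp only [pvStepA]
  rw [pvAllowed_contains, pvValues_contains]
  split_ifs with h1 h2 <;> try rfl
  cases arr.getLast? with
  | none => rfl
  | some x => simp only [pvAllowed_get?]

lemma pvFoldA_none (xs : List Char) : xs.foldl pvStepA none = none := by
  induction xs with
  | nil => rfl
  | cons c cs ih => simpa [pvStepA] using ih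

lemma pvFoldA_eq (xs : List Char) : ∀ stk : List Char,
    xs.foldl pvStepA (some stk.reverse) = (pvRun stk xs).map List.reverse := by
  induction xs with
  | nil => intro stk; rw [List.foldl_nil, pvRun_nil]; rfl
  | cons c cs ih =>
    intro stk
    by_cases ho : pvIsOpen c = true
    · have hstep : pvStepA (some stk.reverse) c = some ((c :: stk).reverse) := by
        rw [pvStepA_some, if_pos ho]; simp
      rw [List.foldl_cons, hstep, ih (c :: stk), pvRun_open ho]
    · have ho' : pvIsOpen c = false := Bool.eq_false_iff.mpr ho
      by_cases hc : pvIsClose c = true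
      · cases stk with
        | nil =>
          have hstep : pvStepA (some (([] : List Char).reverse)) c = none := by
            rw [pvStepA_some, if_neg ho, if_pos hc]; rfl
          rw [List.foldl_cons, hstep, pvFoldA_none, pvRun_close_nil ho' hc]; rfl
        | cons t r =>
          by_cases hm : pvCloses t c = true
          · have hstep : pvStepA (some (t :: r).reverse) c = some r.reverse := by
              rw [pvStepA_some, if_neg ho, if_pos hc]
              simp only [List.reverse_cons, List.getLast?_concat, hm, if_true, List.dropLast_concat]
            rw [List.foldl_cons, hstep, ih r, pvRun_close_cons ho' hc, if_pos hm]
          · have hstep : pvStepA (some (t :: r).reverse) c = none := by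
              rw [pvStepA_some, if_neg ho, if_pos hc]
              simp only [List.reverse_cons, List.getLast?_concat, hm, Bool.false_eq_true, if_false]
            rw [List.foldl_cons, hstep, pvFoldA_none, pvRun_close_cons ho' hc, if_neg hm]; rfl
      · have hc' : pvIsClose c = false := Bool.eq_false_iff.mpr hc
        have hstep : pvStepA (some stk.reverse) c = some stk.reverse := by
          rw [pvStepA_some, if_neg ho, if_neg hc]
        rw [List.foldl_cons, hstep, ih stk, pvRun_skip ho' hc']

lemma more_optimized_eq_valid (s : String) : more_optimized s = pvValid s.toList := by
  unfold more_optimized pvValid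
  have h := pvFoldA_eq s.toList []
  simp only [List.reverse_nil] at h
  rw [h]
  cases pvRun [] s.toList with
  | none => rfl
  | some stk => simp

lemma pvIsBracket_eq (c : Char) : pvIsBracket c = (pvIsOpen c || pvIsClose c) := by
  have hl : "(){}[]".toList = ['(', ')', '{', '}', '[', ']'] := by decide
  rw [Bool.eq_iff_iff]
  simp only [pvIsBracket, hl, pvIsOpen, pvIsClose, List.contains_cons, Bool.or_eq_true,
    beq_iff_eq]
  aesop

lemma pvNotBracket {c : Char} (hb : pvIsBracket c = false) :
    pvIsOpen c = false ∧ pvIsClose c = false := by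
  have h := pvIsBracket_eq c
  rw [hb] at h
  have h2 : (pvIsOpen c || pvIsClose c) = false := h.symm
  rw [Bool.or_eq_false_iff] at h2
  exact h2

lemma pvRun_filter (xs : List Char) : ∀ stk,
    pvRun stk (xs.filter pvIsBracket) = pvRun stk xs := by
  induction xs with
  | nil => intro _; rfl
  | cons c cs ih =>
    intro stk
    by_cases hb : pvIsBracket c = true
    · rw [List.filter_cons_of_pos hb]
      by_cases ho : pvIsOpen c = true
      · rw [pvRun_open ho, pvRun_open ho, ih]
      · have ho' : pvIsOpen c = false := Bool.eq_false_iff.mpr ho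
        by_cases hc : pvIsClose c = true
        · cases stk with
          | nil => rw [pvRun_close_nil ho' hc, pvRun_close_nil ho' hc]
          | cons t r =>
            rw [pvRun_close_cons ho' hc, pvRun_close_cons ho' hc]
            by_cases hm : pvCloses t c = true
            · rw [if_pos hm, if_pos hm, ih]
            · rw [if_neg hm, if_neg hm]
        · have hc' : pvIsClose c = false := Bool.eq_false_iff.mpr hc
          rw [pvRun_skip ho' hc', pvRun_skip ho' hc', ih]
    · have hb' : pvIsBracket c = false := Bool.eq_false_iff.mpr hb
      obtain ⟨ho', hc'⟩ := pvNotBracket hb'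
      rw [List.filter_cons_of_neg (by simp [hb']), ih stk, pvRun_skip ho' hc']

-- equations of pvRepl
lemma pvRepl_nil (o c : Char) : pvRepl o c [] = [] := by
  rw [pvRepl.eq_def]

lemma pvRepl_single (o c x : Char) : pvRepl o c [x] = [x] := by
  rw [pvRepl.eq_def]

lemma pvRepl_cons₂ (o c x y : Char) (rest : List Char) :
    pvRepl o c (x :: y :: rest) =
      if x = o ∧ y = c then pvRepl o c rest else x :: pvRepl o c (y :: rest) := by
  rw [pvRepl.eq_def]

lemma pvRepl_length_le (o c : Char) : ∀ xs : List Char, (pvRepl o c xs).length ≤ xs.length := by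
  intro xs
  induction xs using pvRepl.induct (o := o) (c := c) with
  | case1 x y rest hm ih =>
    rw [pvRepl_cons₂, if_pos hm]
    simp only [List.length_cons]
    omega
  | case2 x y rest hm ih =>
    rw [pvRepl_cons₂, if_neg hm]
    simp only [List.length_cons] at ih ⊢
    omega
  | case3 l h =>
    rcases l with _ | ⟨a, _ | ⟨b, rest⟩⟩
    · rw [pvRepl_nil]
    · rw [pvRepl_single]
    · exact (h a b rest rfl).elim

lemma pvRepl_eq_of_length (o c : Char) : ∀ xs : List Char,
    (pvRepl o c xs).length = xs.length → pvRepl o c xs = xs := by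
  intro xs
  induction xs using pvRepl.induct (o := o) (c := c) with
  | case1 x y rest hm ih =>
    intro hlen
    rw [pvRepl_cons₂, if_pos hm] at hlen
    have := pvRepl_length_le o c rest
    simp only [List.length_cons] at hlen
    omega
  | case2 x y rest hm ih =>
    intro hlen
    rw [pvRepl_cons₂, if_neg hm] at hlen ⊢
    simp only [List.length_cons] at hlen
    have hlen' : (pvRepl o c (y :: rest)).length = (y :: rest).length := by
      simp only [List.length_cons]
      omega
    rw [ih hlen']
  | case3 l h =>
    intro _
    rcases l with _ | ⟨a, _ | ⟨b, rest⟩⟩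
    · rw [pvRepl_nil]
    · rw [pvRepl_single]
    · exact (h a b rest rfl).elim

lemma pvRun_repl (o c : Char) (ho : pvIsOpen o = true) (hc : pvIsClose c = true)
    (hm : pvCloses o c = true) : ∀ xs stk, pvRun stk (pvRepl o c xs) = pvRun stk xs := by
  intro xs
  induction xs using pvRepl.induct (o := o) (c := c) with
  | case1 x y rest hp ih =>
    intro stk
    obtain ⟨hx, hy⟩ := hp
    subst hx; subst hy
    rw [pvRepl_cons₂, if_pos ⟨rfl, rfl⟩, ih stk, pvRun_open ho,
      pvRun_close_cons (pvClose_not_open hc) hc, if_pos hm]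
  | case2 x y rest hp ih =>
    intro stk
    rw [pvRepl_cons₂, if_neg hp]
    by_cases ho2 : pvIsOpen x = true
    · rw [pvRun_open ho2, pvRun_open ho2, ih]
    · have ho2' : pvIsOpen x = false := Bool.eq_false_iff.mpr ho2
      by_cases hc2 : pvIsClose x = true
      · cases stk with
        | nil => rw [pvRun_close_nil ho2' hc2, pvRun_close_nil ho2' hc2]
        | cons t r =>
          rw [pvRun_close_cons ho2' hc2, pvRun_close_cons ho2' hc2]
          by_cases hmm : pvCloses t x = true
          · rw [if_pos hmm, if_pos hmm, ih]
          · rw [if_neg hmm, if_neg hmm]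
      · have hc2' : pvIsClose x = false := Bool.eq_false_iff.mpr hc2
        rw [pvRun_skip ho2' hc2', pvRun_skip ho2' hc2', ih]
  | case3 l h =>
    intro stk
    rcases l with _ | ⟨a, _ | ⟨b, rest⟩⟩
    · rw [pvRepl_nil]
    · rw [pvRepl_single]
    · exact (h a b rest rfl).elim

lemma pvRun_reduceOnce (t : List Char) (stk : List Char) :
    pvRun stk (pvReduceOnce t) = pvRun stk t := by
  unfold pvReduceOnce
  rw [pvRun_repl '{' '}' (by decide) (by decide) (by decide),
      pvRun_repl '[' ']' (by decide) (by decide) (by decide),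
      pvRun_repl '(' ')' (by decide) (by decide) (by decide)]

lemma pvReduceOnce_shrink (t : List Char) (h : pvReduceOnce t ≠ t) :
    (pvReduceOnce t).length < t.length := by
  have l1 := pvRepl_length_le '(' ')' t
  have l2 := pvRepl_length_le '[' ']' (pvRepl '(' ')' t)
  have l3 := pvRepl_length_le '{' '}' (pvRepl '[' ']' (pvRepl '(' ')' t))
  unfold pvReduceOnce at h ⊢
  by_contra hlt
  rw [not_lt] at hlt
  have e1 : pvRepl '(' ')' t = t := pvRepl_eq_of_length _ _ _ (by omega)
  rw [e1] at h hlt l2 l3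
  have e2 : pvRepl '[' ']' t = t := pvRepl_eq_of_length _ _ _ (by omega)
  rw [e2] at h hlt l3
  have e3 : pvRepl '{' '}' t = t := pvRepl_eq_of_length _ _ _ (by omega)
  exact h e3

lemma pvRepl_all (o c : Char) (P : Char → Bool) : ∀ xs : List Char,
    xs.all P = true → (pvRepl o c xs).all P = true := by
  intro xs
  induction xs using pvRepl.induct (o := o) (c := c) with
  | case1 x y rest hm ih =>
    intro h
    rw [pvRepl_cons₂, if_pos hm]
    simp only [List.all_cons, Bool.and_eq_true] at h
    exact ih h.2.2
  | case2 x y rest hm ih =>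
    intro h
    rw [pvRepl_cons₂, if_neg hm]
    simp only [List.all_cons, Bool.and_eq_true] at h ⊢
    exact ⟨h.1, by simpa using ih (by simp [h.2.1, h.2.2])⟩
  | case3 l h =>
    intro hh
    rcases l with _ | ⟨a, _ | ⟨b, rest⟩⟩
    · rwa [pvRepl_nil]
    · rwa [pvRepl_single]
    · exact (h a b rest rfl).elim

lemma pvReduceOnce_all (P : Char → Bool) (t : List Char) (h : t.all P = true) :
    (pvReduceOnce t).all P = true := by
  unfold pvReduceOnce
  exact pvRepl_all _ _ _ _ (pvRepl_all _ _ _ _ (pvRepl_all _ _ _ _ h))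

-- a list with an adjacent (o, c) pair strictly shrinks under pvRepl
lemma pvRepl_lt_of_pair (o c : Char) (_hoc : o ≠ c) : ∀ u v : List Char,
    (pvRepl o c (u ++ o :: c :: v)).length < (u ++ o :: c :: v).length := by
  intro u
  induction u with
  | nil =>
    intro v
    rw [List.nil_append, pvRepl_cons₂, if_pos ⟨rfl, rfl⟩]
    have := pvRepl_length_le o c v
    simp only [List.length_cons]
    omega
  | cons a u' ih =>
    intro v
    cases u' with
    | nil =>
      rw [List.cons_append, List.nil_append, pvRepl_cons₂]
      split_ifs with h
      · have := pvRepl_length_le o c (c :: v)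
        simp only [List.length_cons] at this ⊢
        omega
      · have hv := ih v
        simp only [List.nil_append] at hv
        simp only [List.length_cons] at hv ⊢
        omega
    | cons d u'' =>
      rw [List.cons_append, List.cons_append, pvRepl_cons₂]
      split_ifs with h
      · have := pvRepl_length_le o c (u'' ++ o :: c :: v)
        simp only [List.length_cons, List.length_append] at this ⊢
        omega
      · have hv := ih v
        rw [List.cons_append] at hv
        simp only [List.length_cons, List.length_append] at hv ⊢
        omega

lemma pvRepl_no_pair (o c : Char) (hoc : o ≠ c) (xs : List Char)
    (hfix : pvRepl o c xs = xs) : ∀ u v : List Char, xs ≠ u ++ o :: c :: v := by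
  intro u v heq
  have h := pvRepl_lt_of_pair o c hoc u v
  rw [← heq, hfix] at h
  omega

-- pushing a block of openers
lemma pvRun_opens (os : List Char) : ∀ (ys stk : List Char), os.all pvIsOpen = true →
    pvRun stk (os ++ ys) = pvRun (os.reverse ++ stk) ys := by
  induction os with
  | nil => intro ys stk _; simp
  | cons a os' ih =>
    intro ys stk h
    simp only [List.all_cons, Bool.and_eq_true] at h
    rw [List.cons_append, pvRun_open h.1, ih _ _ h.2, List.reverse_cons, List.append_assoc]
    rfl

-- a nonempty bracket-only fixed point of pvReduceOnce is invalid
lemma pvFixpoint_invalid (t : List Char) (hb : t.all pvIsBracket = true)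
    (hfix : pvReduceOnce t = t) (hne : t ≠ []) : pvValid t = false := by
  -- each of the three replacements is itself the identity on t
  have l1 := pvRepl_length_le '(' ')' t
  have l2 := pvRepl_length_le '[' ']' (pvRepl '(' ')' t)
  have l3 := pvRepl_length_le '{' '}' (pvRepl '[' ']' (pvRepl '(' ')' t))
  have hlen : (pvReduceOnce t).length = t.length := by rw [hfix]
  unfold pvReduceOnce at hlen
  have e1 : pvRepl '(' ')' t = t := pvRepl_eq_of_length _ _ _ (by omega)
  have e2 : pvRepl '[' ']' t = t := by
    have h' := pvRepl_eq_of_length '[' ']' (pvRepl '(' ')' t) (by omega)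
    rwa [e1] at h'
  have e3 : pvRepl '{' '}' t = t := by
    have h' : pvReduceOnce t = t := hfix
    unfold pvReduceOnce at h'
    rwa [e1, e2] at h'
  -- decompose t into its leading openers and the rest
  have hsplit : t = t.takeWhile pvIsOpen ++ t.dropWhile pvIsOpen :=
    (List.takeWhile_append_dropWhile).symm
  have hos : (t.takeWhile pvIsOpen).all pvIsOpen = true := by
    simp only [List.all_eq_true]
    intro x hx
    exact List.mem_takeWhile_imp hx
  cases hrest : t.dropWhile pvIsOpen with
  | nil =>
    -- all leading openers: final stack nonempty
    have hrun : pvRun [] t = some ((t.takeWhile pvIsOpen).reverse) := by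
      conv_lhs => rw [hsplit, hrest]
      rw [pvRun_opens _ _ _ hos, pvRun_nil, List.append_nil]
    have hne' : t.takeWhile pvIsOpen ≠ [] := by
      intro hnil
      apply hne
      rw [hsplit, hrest, hnil]
      rfl
    unfold pvValid
    rw [hrun]
    cases hq : (t.takeWhile pvIsOpen).reverse with
    | nil => exact absurd (by simpa using hq) hne'
    | cons a b => rfl
  | cons c rest' =>
    have hcnotopen : pvIsOpen c = false := by
      apply Bool.eq_false_iff.mpr
      intro hcontra
      have h4 := List.head?_dropWhile_not pvIsOpen t
      rw [hrest] at h4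
      simp [hcontra] at h4
    have hcbr : pvIsBracket c = true := by
      have hmem : c ∈ t := by
        rw [hsplit, hrest]
        exact List.mem_append_right _ (List.mem_cons_self ..)
      simp only [List.all_eq_true] at hb
      exact hb c hmem
    have hcclose : pvIsClose c = true := by
      have h := pvIsBracket_eq c
      rw [hcbr, hcnotopen] at h
      simpa using h.symm
    have hrun : pvRun [] t = pvRun ((t.takeWhile pvIsOpen).reverse) (c :: rest') := by
      conv_lhs => rw [hsplit, hrest]
      rw [pvRun_opens _ _ _ hos, List.append_nil]
    cases hq : t.takeWhile pvIsOpen with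
    | nil =>
      have hnone : pvRun [] t = none := by
        rw [hrun, hq, List.reverse_nil, pvRun_close_nil hcnotopen hcclose]
      unfold pvValid
      rw [hnone]
    | cons o1 os1 =>
      obtain ⟨tl, u, hrev⟩ : ∃ tl u, (o1 :: os1).reverse = tl :: u := by
        cases h : (o1 :: os1).reverse with
        | nil => simp at h
        | cons a b => exact ⟨a, b, rfl⟩
      by_cases hmm : pvCloses tl c = true
      · exfalso
        -- tl is adjacent to c in t, contradicting the fixed point
        have hlast : o1 :: os1 = u.reverse ++ [tl] := by
          have h := congrArg List.reverse hrev
          simpa using h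
        have ht : t = u.reverse ++ tl :: c :: rest' := by
          rw [hsplit, hrest, hq, hlast]
          simp
        simp only [pvCloses, Bool.or_eq_true, Bool.and_eq_true, beq_iff_eq] at hmm
        rcases hmm with (⟨h1, h2⟩ | ⟨h1, h2⟩) | ⟨h1, h2⟩ <;> subst h1 <;> subst h2
        · exact pvRepl_no_pair '(' ')' (by decide) t e1 u.reverse rest' ht
        · exact pvRepl_no_pair '[' ']' (by decide) t e2 u.reverse rest' ht
        · exact pvRepl_no_pair '{' '}' (by decide) t e3 u.reverse rest' ht
      · have hnone : pvRun [] t = none := by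
          rw [hrun, hq, hrev, pvRun_close_cons hcnotopen hcclose, if_neg hmm]
        unfold pvValid
        rw [hnone]

lemma pvLoopB_eq_valid : ∀ (fuel : Nat) (t : List Char), t.length < fuel →
    t.all pvIsBracket = true → pvLoopB fuel t = pvValid t := by
  intro fuel
  induction fuel with
  | zero => intro t ht _; omega
  | succ n ih =>
    intro t ht hb
    simp only [pvLoopB]
    by_cases hfix : pvReduceOnce t = t
    · rw [if_pos hfix]
      by_cases htnil : t = []
      · subst htnil; decide
      · rw [pvFixpoint_invalid t hb hfix htnil]
        cases t with
        | nil => exact absurd rfl htnil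
        | cons a b => rfl
    · rw [if_neg hfix]
      have hlt := pvReduceOnce_shrink t hfix
      rw [ih (pvReduceOnce t) (by omega) (pvReduceOnce_all _ _ hb)]
      unfold pvValid
      rw [pvRun_reduceOnce]

lemma more_optimized_alt_eq_valid (s : String) : more_optimized_alt s = pvValid s.toList := by
  unfold more_optimized_alt
  have hall : (s.toList.filter pvIsBracket).all pvIsBracket = true := by
    simp only [List.all_eq_true]
    intro x hx
    exact (List.mem_filter.mp hx).2
  rw [pvLoopB_eq_valid _ _ (by omega) hall]
  unfold pvValid
  rw [pvRun_filter]

-- ===== VERDICT (by name: the statement is the Claim_ definition above) =====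
theorem more_optimized_spec : Claim_equal_more_optimized := by
  intro s _
  unfold Spec_more_optimized
  rw [more_optimized_eq_valid, more_optimized_alt_eq_valid]
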